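-- pv_equiv track=rewrite | github.com/jscervantes/validChessBoard | isValidChessBoard.py | pawnCounter
-- ===== SOURCE A (Python) =====
-- def pawnCounter(pieces):
--     answer = ""
--     if sum(pawn == 'wpawn' for pawn in pieces) > 8:
--         answer = "You have too many white pawns."
--     elif sum(pawn == 'bpawn' for pawn in pieces) > 8:
--         answer = "You have too many black pawns."
--     else:
--         answer = "Pawn count valid."
--
--     return answer
-- ===== SOURCE B (Python) =====
-- def pawnCounter(pieces):
--     # Short-circuit scan: stop as soon as a 9th white pawn is seen; stop
--     # counting black pawns once a 9th one has been seen (saturating flag).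
--     white = 0
--     black = 0
--     black_over = False
--     for item in pieces:
--         if item == 'wpawn':
--             white += 1
--             if white > 8:
--                 return "You have too many white pawns."
--         elif item == 'bpawn' and not black_over:
--             black += 1
--             black_over = black > 8
--     return "You have too many black pawns." if black_over else "Pawn count valid."
-- ===== Notes on version B (the rewrite author's own statement) =====
-- stated objective: alternative
-- what changed: Replaces A's two full generator-sum passes with a single short-circuiting scan that returns immediately when the 9th white pawn is found and stops counting black pawns once their 9th is seen, deciding the verdict during the traversal instead of from final totals.
import Mathlib
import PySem

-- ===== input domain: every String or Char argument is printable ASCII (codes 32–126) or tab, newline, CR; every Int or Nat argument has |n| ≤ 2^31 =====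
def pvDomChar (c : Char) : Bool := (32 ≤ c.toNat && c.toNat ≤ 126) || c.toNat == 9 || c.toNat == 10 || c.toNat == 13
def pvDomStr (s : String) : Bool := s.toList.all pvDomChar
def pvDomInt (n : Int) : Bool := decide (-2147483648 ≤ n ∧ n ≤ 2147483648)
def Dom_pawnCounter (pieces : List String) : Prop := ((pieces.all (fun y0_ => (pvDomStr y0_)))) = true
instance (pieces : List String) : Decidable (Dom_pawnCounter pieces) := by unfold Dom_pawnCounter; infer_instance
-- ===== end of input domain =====

-- B replaces A's two full counting passes with a single short-circuiting scan that
-- returns as soon as a 9th white pawn is seen and stops counting black pawns after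
-- their 9th (objective: alternative).


-- ===== PORT A =====
-- sum(pawn == 'wpawn' for pawn in pieces): a fold adding the booleans as 0/1
def pawnCounter (pieces : List String) : String :=
  if (pieces.foldl (fun acc pawn => acc + (if pawn = "wpawn" then 1 else 0)) (0 : Int)) > 8 then
    "You have too many white pawns."
  else if (pieces.foldl (fun acc pawn => acc + (if pawn = "bpawn" then 1 else 0)) (0 : Int)) > 8 then
    "You have too many black pawns."
  else
    "Pawn count valid."

-- ===== PORT B =====
-- B's for-loop with early return and saturating black flag, as structural recursion
def pawnCounterGo : List String → Int → Int → Bool → String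
  | [], _, _, blackOver =>
      if blackOver then "You have too many black pawns." else "Pawn count valid."
  | item :: rest, white, black, blackOver =>
      if item = "wpawn" then
        if white + 1 > 8 then "You have too many white pawns."
        else pawnCounterGo rest (white + 1) black blackOver
      else if item = "bpawn" && !blackOver then
        pawnCounterGo rest white (black + 1) (decide (black + 1 > 8))
      else
        pawnCounterGo rest white black blackOver

def pawnCounter_alt (pieces : List String) : String :=
  pawnCounterGo pieces 0 0 false

-- ===== PRECONDITION & SPEC =====
def Spec_pawnCounter (pieces : List String) (out : String) : Prop := out = pawnCounter_alt pieces
instance (pieces : List String) (out : String) : Decidable (Spec_pawnCounter pieces out) := by unfold Spec_pawnCounter; infer_instance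

-- ===== CLAIM (what is proved, stated in full; the proofs are below) =====
def Claim_equal_pawnCounter : Prop := ∀ (pieces : List String), Dom_pawnCounter pieces → Spec_pawnCounter pieces (pawnCounter pieces)

-- ===== LEMMAS AND PROOFS =====
theorem foldl_count_ge (f : String → Int) (hf : ∀ s, 0 ≤ f s) (pieces : List String) (w : Int) :
    w ≤ pieces.foldl (fun acc pawn => acc + f pawn) w := by
  induction pieces generalizing w with
  | nil => simp
  | cons p rest ih =>
      simp only [List.foldl]
      calc w ≤ w + f p := by have := hf p; omega
        _ ≤ _ := ih (w + f p)

theorem wsum_ge (pieces : List String) (w : Int) :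
    w ≤ pieces.foldl (fun acc pawn => acc + (if pawn = "wpawn" then 1 else 0)) w :=
  foldl_count_ge _ (fun s => by split <;> omega) pieces w

theorem bsum_ge (pieces : List String) (b : Int) :
    b ≤ pieces.foldl (fun acc pawn => acc + (if pawn = "bpawn" then 1 else 0)) b :=
  foldl_count_ge _ (fun s => by split <;> omega) pieces b

theorem pawnCounterGo_true (pieces : List String) (w b : Int) (hw : w ≤ 8) :
    pawnCounterGo pieces w b true =
      if (pieces.foldl (fun acc pawn => acc + (if pawn = "wpawn" then 1 else 0)) w) > 8 then
        "You have too many white pawns."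
      else "You have too many black pawns." := by
  induction pieces generalizing w b with
  | nil => simp [pawnCounterGo]; omega
  | cons p rest ih =>
      simp only [pawnCounterGo, List.foldl]
      by_cases hp : p = "wpawn"
      · simp only [if_pos hp]
        by_cases h9 : w + 1 > 8
        · have := wsum_ge rest (w + 1)
          rw [if_pos h9, if_pos (by omega)]
        · rw [if_neg h9, ih (w + 1) b (by omega)]
      · simp only [if_neg hp, add_zero,
            if_neg (by simp : ¬ (p = "bpawn" && !true) = true)]
        exact ih w b hw

theorem pawnCounterGo_false (pieces : List String) (w b : Int) (hw : w ≤ 8) (hb : b ≤ 8) :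
    pawnCounterGo pieces w b false =
      if (pieces.foldl (fun acc pawn => acc + (if pawn = "wpawn" then 1 else 0)) w) > 8 then
        "You have too many white pawns."
      else if (pieces.foldl (fun acc pawn => acc + (if pawn = "bpawn" then 1 else 0)) b) > 8 then
        "You have too many black pawns."
      else "Pawn count valid." := by
  induction pieces generalizing w b with
  | nil =>
      simp only [pawnCounterGo, List.foldl, Bool.false_eq_true, if_false]
      rw [if_neg (by omega), if_neg (by omega)]
  | cons p rest ih =>
      simp only [pawnCounterGo, List.foldl]
      by_cases hp : p = "wpawn"
      · have hpb : p ≠ "bpawn" := by simp [hp]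
        simp only [if_pos hp, if_neg hpb, add_zero]
        by_cases h9 : w + 1 > 8
        · have := wsum_ge rest (w + 1)
          rw [if_pos h9, if_pos (by omega)]
        · rw [if_neg h9, ih (w + 1) b (by omega) hb]
      · simp only [if_neg hp, add_zero]
        by_cases hpb : p = "bpawn"
        · simp only [if_pos (show (p = "bpawn" && !false) = true by simp [hpb]), if_pos hpb]
          by_cases h9 : b + 1 > 8
          · have hd : decide ((b:Int) + 1 > 8) = true := by simpa using h9
            rw [hd, pawnCounterGo_true rest w (b + 1) hw]
            have := bsum_ge rest (b + 1)
            by_cases hwsum : (rest.foldl (fun acc pawn => acc + (if pawn = "wpawn" then 1 else 0)) w) > 8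
            · rw [if_pos hwsum, if_pos hwsum]
            · rw [if_neg hwsum, if_neg hwsum, if_pos (by omega)]
          · have hd : decide ((b:Int) + 1 > 8) = false := by simpa using h9
            rw [hd, ih w (b + 1) hw (by omega)]
        · simp only [if_neg (show ¬ (p = "bpawn" && !false) = true by simp [hpb]),
              if_neg hpb, add_zero]
          exact ih w b hw hb

-- ===== VERDICT (by name: the statement is the Claim_ definition above) =====
theorem pawnCounter_spec : Claim_equal_pawnCounter := by
  intro pieces _
  unfold Spec_pawnCounter pawnCounter pawnCounter_alt
  rw [pawnCounterGo_false pieces 0 0 (by omega) (by omega)]
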